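-- pv_equiv track=rewrite | github.com/MichalPiatek01/studies | zad_1.py | oblicz_statystyki
-- ===== SOURCE A (Python) =====
-- from collections import defaultdict, Counter
--
-- def oblicz_statystyki(dane):
--     liczba_atrybutow = len(dane[0])
--     unikalne_wartosci = [set() for _ in range(liczba_atrybutow)]
--     wystapienia = [defaultdict(int) for _ in range(liczba_atrybutow)]
--
--     for wiersz in dane:
--         for i, wartosc in enumerate(wiersz):
--             unikalne_wartosci[i].add(wartosc)
--             wystapienia[i][wartosc] += 1
--
--     return unikalne_wartosci, wystapienia
-- ===== SOURCE B (Python) =====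
-- from collections import defaultdict
--
-- def oblicz_statystyki(dane):
--     liczba_atrybutow = len(dane[0])
--     kolumny = [[wiersz[i] for wiersz in dane if i < len(wiersz)]
--                for i in range(liczba_atrybutow)]
--     unikalne_wartosci = [set(kolumna) for kolumna in kolumny]
--     wystapienia = []
--     for kolumna in kolumny:
--         licznik = defaultdict(int)
--         for wartosc in kolumna:
--             licznik[wartosc] += 1
--         wystapienia.append(licznik)
--     return unikalne_wartosci, wystapienia
-- ===== Notes on version B (the rewrite author's own statement) =====
-- stated objective: idiomatic
-- what changed: B transposes the data and handles one column at a time (extract the column, build its set and its count dict completely, move on), a column-major pass instead of A's row-major scatter that updates all per-column accumulators in parallel.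
import Mathlib
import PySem

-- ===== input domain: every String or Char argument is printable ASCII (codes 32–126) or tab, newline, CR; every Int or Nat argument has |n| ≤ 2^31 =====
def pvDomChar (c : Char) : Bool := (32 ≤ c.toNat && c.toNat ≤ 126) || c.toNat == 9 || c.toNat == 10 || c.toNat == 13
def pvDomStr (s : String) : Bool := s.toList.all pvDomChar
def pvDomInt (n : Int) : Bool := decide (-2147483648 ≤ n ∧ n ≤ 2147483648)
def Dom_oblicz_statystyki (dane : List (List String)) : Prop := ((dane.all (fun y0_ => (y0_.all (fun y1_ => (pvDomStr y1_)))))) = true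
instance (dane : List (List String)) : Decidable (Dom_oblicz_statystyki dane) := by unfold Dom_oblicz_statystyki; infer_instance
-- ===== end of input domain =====

-- B computes the same per-column unique values and counts column-by-column (transpose first,
-- then finish each column's set and count dict before the next) instead of A's row-major scatter.


-- ===== PORT A =====
-- Python A raises IndexError on dane == [] (dane[0]) and, via unikalne_wartosci[i], when some
-- row is longer than the first row; both are excluded by Pre_ below (headD / the no-op of an
-- out-of-range List.modify are mere totalizers, never reached inside Pre_).
def oblicz_statystyki (dane : List (List String)) : List (List String) × (List (List (String × Int))) :=
  let liczba_atrybutow := (dane.headD []).length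
  let unikalne0 : List (PySem.Set String) := List.replicate liczba_atrybutow PySem.Set.empty
  let wystapienia0 : List (PySem.Dict String Int) := List.replicate liczba_atrybutow PySem.Dict.empty
  let st := dane.foldl (fun st wiersz =>
      (PySem.List.enumerate wiersz).foldl (fun st p =>
        (st.1.modify p.1.toNat (fun s => PySem.Set.add s p.2),
         st.2.modify p.1.toNat (fun d => d.modify p.2 0 (fun c => c + 1)))) st)
    (unikalne0, wystapienia0)
  (st.1, st.2.map PySem.Dict.items)

-- ===== PORT B =====
-- [wiersz[i] for wiersz in dane if i < len(wiersz)]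
def kolumnaB (dane : List (List String)) (i : Nat) : List String :=
  (dane.filter (fun w => i < w.length)).map (fun w => w.getD i "")

def oblicz_statystyki_alt (dane : List (List String)) : List (List String) × (List (List (String × Int))) :=
  let liczba_atrybutow := (dane.headD []).length
  let kolumny := (List.range liczba_atrybutow).map (kolumnaB dane)
  (kolumny.map (fun k => PySem.Set.ofList k),
   kolumny.map (fun k =>
     (k.foldl (fun d v => d.modify v 0 (fun c => c + 1)) PySem.Dict.empty).items))

-- ===== PRECONDITION & SPEC =====
-- Pre_ excludes exactly the inputs on which Python A raises IndexError: the empty list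
-- (dane[0]) and ragged inputs where some row is longer than the first row.
def Pre_oblicz_statystyki (dane : List (List String)) : Prop :=
  dane ≠ [] ∧ ∀ w ∈ dane, w.length ≤ (dane.headD []).length
instance (dane : List (List String)) : Decidable (Pre_oblicz_statystyki dane) := by
  unfold Pre_oblicz_statystyki; infer_instance

def pvWitness_oblicz_statystyki : List (List String) := [["a", "b"], ["a"], ["c", "b"]]

def Spec_oblicz_statystyki (dane : List (List String)) (out : List (List String) × (List (List (String × Int)))) : Prop := out = oblicz_statystyki_alt dane
instance (dane : List (List String)) (out : List (List String) × (List (List (String × Int)))) : Decidable (Spec_oblicz_statystyki dane out) := by unfold Spec_oblicz_statystyki; infer_instance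

-- ===== CLAIM (what is proved, stated in full; the proofs are below) =====
def Claim_equal_oblicz_statystyki : Prop := ∀ (dane : List (List String)), Dom_oblicz_statystyki dane → Pre_oblicz_statystyki dane → Spec_oblicz_statystyki dane (oblicz_statystyki dane)


-- ===== LEMMAS AND PROOFS =====

-- column j of the rows, as the subsequence of entries that exist
def pvCol {σ : Type} (rows : List (List σ)) (j : Nat) : List σ :=
  rows.filterMap (fun w => w[j]?)

theorem pv_kolumnaB_eq (dane : List (List String)) (i : Nat) :
    kolumnaB dane i = pvCol dane i := by
  induction dane with
  | nil => rfl
  | cons w rows ih =>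
    by_cases h : i < w.length <;>
      simp [kolumnaB, pvCol, h] at ih ⊢ <;>
      exact ih

-- one row's scatter loop, pointwise
theorem pv_enum_scatter {α σ : Type} (f : α → σ → α) (w : List σ) :
    ∀ (s : Nat) (st : List α) (j : Nat),
    ((PySem.List.enumerate w (s : Int)).foldl
        (fun st p => st.modify p.1.toNat (fun a => f a p.2)) st)[j]?
      = (match (if s ≤ j then w[j - s]? else none) with
          | some v => (fun a => f a v) <$> st[j]?
          | none => st[j]?) := by
  induction w with
  | nil =>
    intro s st j
    simp [PySem.List.enumerate]
  | cons x xs ih =>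
    intro s st j
    rw [PySem.List.enumerate_cons]
    have hc : (s : Int) + 1 = ((s + 1 : Nat) : Int) := by push_cast; ring
    simp only [List.foldl_cons, hc, ih (s + 1)]
    rcases lt_trichotomy s j with h | h | h
    · have h1 : s + 1 ≤ j := by omega
      have h2 : s ≤ j := by omega
      have h3 : j - s = (j - (s + 1)) + 1 := by omega
      simp [h1, h2, h3, Nat.ne_of_lt h]
    · subst h
      simp
    · have h1 : ¬ s + 1 ≤ j := by omega
      have h2 : ¬ s ≤ j := by omega
      simp [h1, h2, Nat.ne_of_gt h]

-- the whole row-major scatter, pointwise: slot j holds the fold of column j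
theorem pv_scatter {α σ : Type} (f : α → σ → α) :
    ∀ (rows : List (List σ)) (st : List α) (j : Nat),
    (rows.foldl (fun st w =>
        (PySem.List.enumerate w).foldl
          (fun st p => st.modify p.1.toNat (fun a => f a p.2)) st) st)[j]?
      = (fun a => (pvCol rows j).foldl f a) <$> st[j]? := by
  intro rows
  induction rows with
  | nil => intro st j; simp [pvCol]
  | cons w rows ih =>
    intro st j
    simp only [List.foldl_cons, ih]
    have h0 : ((PySem.List.enumerate w (0 : Int)).foldl
        (fun st p => st.modify p.1.toNat (fun a => f a p.2)) st)[j]?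
        = (match w[j]? with
            | some v => (fun a => f a v) <$> st[j]?
            | none => st[j]?) := by
      simpa using pv_enum_scatter f w 0 st j
    have hcol : pvCol (w :: rows) j
        = (match w[j]? with | some v => v :: pvCol rows j | none => pvCol rows j) := by
      cases hw : w[j]? <;> simp [pvCol, hw]
    rw [show PySem.List.enumerate w = PySem.List.enumerate w (0 : Int) from rfl, h0, hcol]
    cases w[j]? <;> cases st[j]? <;> simp

theorem pv_ports_eq (dane : List (List String)) :
    oblicz_statystyki dane = oblicz_statystyki_alt dane := by
  have h1 : dane.foldl (fun u w => (PySem.List.enumerate w).foldl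
        (fun u p => u.modify p.1.toNat (fun s => PySem.Set.add s p.2)) u)
      (List.replicate (dane.headD []).length PySem.Set.empty)
      = (List.range (dane.headD []).length).map
          (fun i => PySem.Set.ofList (kolumnaB dane i)) := by
    apply List.ext_getElem?
    intro j
    rw [pv_scatter (f := fun (s : PySem.Set String) (v : String) => PySem.Set.add s v),
        List.getElem?_replicate, List.getElem?_map]
    by_cases hj : j < (dane.headD []).length
    · rw [if_pos hj, List.getElem?_range hj]
      simp [pv_kolumnaB_eq, PySem.Set.ofList_eq_foldl, PySem.Set.empty]
    · rw [if_neg hj, List.getElem?_eq_none (by simpa using hj)]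
      rfl
  have h2 : dane.foldl (fun d w => (PySem.List.enumerate w).foldl
        (fun d p => d.modify p.1.toNat (fun a => a.modify p.2 (0 : Int) (fun c => c + 1))) d)
      (List.replicate (dane.headD []).length PySem.Dict.empty)
      = (List.range (dane.headD []).length).map
          (fun i => (kolumnaB dane i).foldl
            (fun d v => d.modify v (0 : Int) (fun c => c + 1)) PySem.Dict.empty) := by
    apply List.ext_getElem?
    intro j
    rw [pv_scatter (f := fun (d : PySem.Dict String Int) (v : String) =>
          d.modify v 0 (fun c => c + 1)),
        List.getElem?_replicate, List.getElem?_map]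
    by_cases hj : j < (dane.headD []).length
    · rw [if_pos hj, List.getElem?_range hj]
      simp [pv_kolumnaB_eq]
    · rw [if_neg hj, List.getElem?_eq_none (by simpa using hj)]
      rfl
  have h3 : List.map PySem.Dict.items
      (dane.foldl (fun d w => (PySem.List.enumerate w).foldl
          (fun d p => d.modify p.1.toNat (fun a => a.modify p.2 (0 : Int) (fun c => c + 1))) d)
        (List.replicate (dane.headD []).length PySem.Dict.empty))
      = (List.range (dane.headD []).length).map
          (fun i => ((kolumnaB dane i).foldl
            (fun d v => d.modify v (0 : Int) (fun c => c + 1)) PySem.Dict.empty).items) := by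
    rw [h2, List.map_map]
    simp [Function.comp]
  unfold oblicz_statystyki oblicz_statystyki_alt
  simp only []
  have hbody : (fun (st : List (PySem.Set String) × List (PySem.Dict String Int)) wiersz =>
      (PySem.List.enumerate wiersz).foldl (fun st p =>
        (st.1.modify p.1.toNat (fun s => PySem.Set.add s p.2),
         st.2.modify p.1.toNat (fun d => d.modify p.2 0 (fun c => c + 1)))) st)
      = (fun st wiersz =>
        ((PySem.List.enumerate wiersz).foldl
            (fun u p => u.modify p.1.toNat (fun s => PySem.Set.add s p.2)) st.1,
         (PySem.List.enumerate wiersz).foldl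
            (fun d p => d.modify p.1.toNat (fun a => a.modify p.2 0 (fun c => c + 1))) st.2)) := by
    funext st wiersz
    obtain ⟨a, b⟩ := st
    exact PySem.List.foldl_prod_mk
      (f := fun (u : List (PySem.Set String)) (p : Int × String) =>
        u.modify p.1.toNat (fun s => PySem.Set.add s p.2))
      (g := fun (d : List (PySem.Dict String Int)) (p : Int × String) =>
        d.modify p.1.toNat (fun a => a.modify p.2 0 (fun c => c + 1)))
      _ _ _
  rw [hbody, PySem.List.foldl_prod_mk
    (f := fun (u : List (PySem.Set String)) (w : List String) =>
      (PySem.List.enumerate w).foldl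
        (fun u p => u.modify p.1.toNat (fun s => PySem.Set.add s p.2)) u)
    (g := fun (d : List (PySem.Dict String Int)) (w : List String) =>
      (PySem.List.enumerate w).foldl
        (fun d p => d.modify p.1.toNat (fun a => a.modify p.2 0 (fun c => c + 1))) d)]
  simp only [Prod.mk.injEq, List.map_map]
  refine ⟨?_, ?_⟩
  · simpa [Function.comp] using h1
  · simpa [Function.comp] using h3

-- ===== VERDICT (by name: the statement is the Claim_ definition above) =====
theorem oblicz_statystyki_spec : Claim_equal_oblicz_statystyki := by
  intro dane _ _
  unfold Spec_oblicz_statystyki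
  exact pv_ports_eq dane
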